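-- pv_equiv track=rewrite | github.com/emmanuelks915/Keystone | keystone/cogs/skills.py | _bucket_skills
-- ===== SOURCE A (Python) =====
-- def _bucket_skills(skills: list[dict]) -> dict[str, list[dict]]:
--     paid = [s for s in skills if int(s.get("cost_ap") or 0) > 0]
--     free = [s for s in skills if int(s.get("cost_ap") or 0) == 0]
--
--     def _sort_key(s: dict):
--         return (int(s.get("cost_ap") or 0), (s.get("skill_name") or "").lower())
--
--     paid.sort(key=_sort_key)
--     free.sort(key=_sort_key)
--     all_sorted = sorted(skills, key=_sort_key)
--
--     return {"all": all_sorted, "paid": paid, "free": free}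
-- ===== SOURCE B (Python) =====
-- def _bucket_skills(skills: list[dict]) -> dict[str, list[dict]]:
--     # Single-pass online insertion sort: each skill is inserted into its sorted
--     # position in "all" and in its bucket as it is encountered; no sort() call.
--     def _key(s):
--         return (int(s.get("cost_ap") or 0), (s.get("skill_name") or "").lower())
--
--     def _insort(lst, s, k):
--         i = 0
--         while i < len(lst) and _key(lst[i]) <= k:
--             i += 1
--         lst.insert(i, s)
--
--     all_sorted, paid, free = [], [], []
--     for s in skills:
--         k = _key(s)
--         _insort(all_sorted, s, k)
--         if k[0] > 0:
--             _insort(paid, s, k)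
--         elif k[0] == 0:
--             _insort(free, s, k)
--     return {"all": all_sorted, "paid": paid, "free": free}
-- ===== Notes on version B (the rewrite author's own statement) =====
-- stated objective: alternative
-- what changed: B replaces A's partition-plus-three-library-sorts with a single pass that inserts every skill into its sorted position in the 'all' list and in its paid/free bucket as it is encountered (online insertion sort, no sort()/sorted() call).
import Mathlib
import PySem

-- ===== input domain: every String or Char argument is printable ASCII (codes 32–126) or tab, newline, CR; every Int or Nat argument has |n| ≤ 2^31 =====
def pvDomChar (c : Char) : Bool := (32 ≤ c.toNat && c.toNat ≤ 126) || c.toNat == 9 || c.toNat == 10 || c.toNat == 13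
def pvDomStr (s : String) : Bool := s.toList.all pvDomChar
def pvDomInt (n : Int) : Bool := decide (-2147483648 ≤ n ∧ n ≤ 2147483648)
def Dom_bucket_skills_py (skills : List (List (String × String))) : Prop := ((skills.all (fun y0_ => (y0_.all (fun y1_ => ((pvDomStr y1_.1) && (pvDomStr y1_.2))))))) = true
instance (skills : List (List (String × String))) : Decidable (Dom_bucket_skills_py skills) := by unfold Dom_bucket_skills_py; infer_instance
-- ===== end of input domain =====

-- B makes a single pass over the skills, inserting each one into its sorted position in the
-- 'all' list and in its paid/free bucket (online insertion sort, no sort call), instead of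
-- A's partition-then-three-library-sorts. Objective: alternative (same results, different algorithm).

-- ===== PORT A =====
-- int(s.get("cost_ap") or 0): missing key or "" → 0; else int(v) (Pre_ excludes non-int strings)
def pvCost (s : List (String × String)) : Int :=
  match PySem.Dict.get? (PySem.Dict.mk s) "cost_ap" with
  | none => 0
  | some v => if v == "" then 0 else (PySem.Int.ofStr? v).getD 0

-- (s.get("skill_name") or "").lower()
def pvNameKey (s : List (String × String)) : String :=
  PySem.Str.lower ((PySem.Dict.get? (PySem.Dict.mk s) "skill_name").getD "")

def bucket_skills_py (skills : List (List (String × String))) : List (String × List (List (String × String))) :=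
  let paid := skills.filter (fun s => decide (0 < pvCost s))
  let free := skills.filter (fun s => decide (pvCost s = 0))
  let paidSorted := PySem.List.sorted2 paid pvCost pvNameKey
  let freeSorted := PySem.List.sorted2 free pvCost pvNameKey
  let allSorted := PySem.List.sorted2 skills pvCost pvNameKey
  [("all", allSorted), ("paid", paidSorted), ("free", freeSorted)]

-- ===== PORT B =====
-- Python tuple '<=' on the key (cost, lowercased name): _key(y) <= k
def pvLeKey (y x : List (String × String)) : Bool :=
  decide (pvCost y < pvCost x) || (decide (pvCost y = pvCost x) && decide (pvNameKey y ≤ pvNameKey x))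

-- _insort: advance past every element whose key is <= k, insert there (stable)
def pvInsert (x : List (String × String)) : List (List (String × String)) → List (List (String × String))
  | [] => [x]
  | y :: ys => if pvLeKey y x then y :: pvInsert x ys else x :: y :: ys

def bucket_skills_py_alt (skills : List (List (String × String))) : List (String × List (List (String × String))) :=
  let st := skills.foldl
    (fun (acc : List (List (String × String)) × List (List (String × String)) × List (List (String × String))) s =>
      let c := pvCost s
      ( pvInsert s acc.1,
        if 0 < c then pvInsert s acc.2.1 else acc.2.1,
        if 0 < c then acc.2.2 else if c = 0 then pvInsert s acc.2.2 else acc.2.2 ))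
    ([], [], [])
  [("all", st.1), ("paid", st.2.1), ("free", st.2.2)]

-- ===== PRECONDITION & SPEC =====
-- Pre_ excludes exactly the inputs where Python's int() raises ValueError in A (and in B):
-- a skill whose "cost_ap" value is a non-empty string that is not a valid integer literal.
def Pre_bucket_skills_py (skills : List (List (String × String))) : Prop :=
  (skills.all (fun s =>
    match PySem.Dict.get? (PySem.Dict.mk s) "cost_ap" with
    | none => true
    | some v => (v == "") || (PySem.Int.ofStr? v).isSome)) = true

instance (skills : List (List (String × String))) : Decidable (Pre_bucket_skills_py skills) := by
  unfold Pre_bucket_skills_py; infer_instance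

def pvWitness_bucket_skills_py : (List (List (String × String))) :=
  [[("cost_ap", "2"), ("skill_name", "B")], [("skill_name", "a")], [("cost_ap", "")]]

def Spec_bucket_skills_py (skills : List (List (String × String))) (out : List (String × List (List (String × String)))) : Prop := out = bucket_skills_py_alt skills
instance (skills : List (List (String × String))) (out : List (String × List (List (String × String)))) : Decidable (Spec_bucket_skills_py skills out) := by unfold Spec_bucket_skills_py; infer_instance

-- ===== CLAIM =====
def Claim_equal_bucket_skills_py : Prop := ∀ (skills : List (List (String × String))), Dom_bucket_skills_py skills → Pre_bucket_skills_py skills → Spec_bucket_skills_py skills (bucket_skills_py skills)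

-- ===== LEMMAS AND PROOFS =====

-- The comparison used by sorted2 with keys pvCost, pvNameKey (Python's lexicographic tuple '<')
def pvBf (a b : List (String × String)) : Bool :=
  decide (pvCost a < pvCost b) || (!decide (pvCost b < pvCost a) && decide (pvNameKey a < pvNameKey b))

lemma sorted2_eq_foldl (xs : List (List (String × String))) :
    PySem.List.sorted2 xs pvCost pvNameKey =
      xs.foldl (fun acc x => PySem.List.insertBy pvBf x acc) [] := rfl

-- '_key(y) <= k' is the negation of the sort comparison 'k < _key(y)'
lemma pvLeKey_eq_not_pvBf (x y : List (String × String)) : pvLeKey y x = !pvBf x y := by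
  simp only [pvLeKey, pvBf]
  rcases lt_trichotomy (pvCost y) (pvCost x) with h | h | h
  · simp [h, not_lt.mpr (le_of_lt h)]
  · have hs : ∀ (u v : List Char), decide (u ≤ v) = !decide (v < u) := by
      intro u v
      by_cases hlt : v < u
      · simp [hlt, not_le.mpr hlt]
      · simp [hlt, not_lt.mp hlt]
    simp [h, hs]
  · simp [h.ne', lt_asymm h, h]

lemma pvInsert_eq_insertBy (x : List (String × String)) (l : List (List (String × String))) :
    pvInsert x l = PySem.List.insertBy pvBf x l := by
  induction l with
  | nil => rfl
  | cons y ys ih =>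
    simp only [pvInsert, PySem.List.insertBy, pvLeKey_eq_not_pvBf, ih]
    cases h : pvBf x y <;> simp [h]

lemma foldl_pvInsert_eq (xs : List (List (String × String))) (a : List (List (String × String))) :
    xs.foldl (fun acc x => pvInsert x acc) a =
      xs.foldl (fun acc x => PySem.List.insertBy pvBf x acc) a := by
  induction xs generalizing a with
  | nil => rfl
  | cons x xs ih => simp [List.foldl_cons, pvInsert_eq_insertBy, ih]

-- the single-pass triple fold computes the three independent insertion folds
lemma fold_triple (xs : List (List (String × String)))
    (a p f : List (List (String × String))) :
    xs.foldl
      (fun (acc : List (List (String × String)) × List (List (String × String)) × List (List (String × String))) s =>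
        let c := pvCost s
        ( pvInsert s acc.1,
          if 0 < c then pvInsert s acc.2.1 else acc.2.1,
          if 0 < c then acc.2.2 else if c = 0 then pvInsert s acc.2.2 else acc.2.2 ))
      (a, p, f) =
    ( xs.foldl (fun acc x => pvInsert x acc) a,
      (xs.filter (fun s => decide (0 < pvCost s))).foldl (fun acc x => pvInsert x acc) p,
      (xs.filter (fun s => decide (pvCost s = 0))).foldl (fun acc x => pvInsert x acc) f ) := by
  induction xs generalizing a p f with
  | nil => rfl
  | cons s xs ih =>
    by_cases h1 : 0 < pvCost s
    · simp only [List.foldl_cons, List.filter_cons, h1, decide_true, if_true, if_pos h1, ih]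
      rw [if_neg (by simp; omega : ¬ decide (pvCost s = 0) = true)]
    · by_cases h2 : pvCost s = 0
      · simp [List.foldl_cons, List.filter_cons, h1, h2, ih]
      · simp [List.foldl_cons, List.filter_cons, h1, h2, ih]

-- ===== VERDICT =====
theorem bucket_skills_py_spec : Claim_equal_bucket_skills_py := by
  intro skills _ _
  unfold Spec_bucket_skills_py bucket_skills_py bucket_skills_py_alt
  simp only [fold_triple, foldl_pvInsert_eq, sorted2_eq_foldl]
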